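-- pv_equiv track=rewrite | github.com/GitGudBruhh/MiniProjectSARKAS | src/fuzzy_hash/final/final.py | find_D_blocks
-- ===== SOURCE A (Python) =====
-- def find_D_blocks(least_idx: int, diff_str: str):
--     block_list = []
--
--     is_block = False
--     start_idx = None
--     end_idx = None
--
--     for idx in range(len(diff_str)):
--         if(not is_block):
--             if(diff_str[idx] == 'D'):
--                 is_block = True
--                 start_idx = idx
--                 end_idx = idx
--             else:
--                 continue
--         else:
--             if(diff_str[idx] == 'D'):
--                 end_idx = idx
--             else:
--                 is_block = False
--                 block_list.append((start_idx, end_idx))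
--                 start_idx = None
--                 end_idx = None
--
--     if(is_block):
--         block_list.append((start_idx, end_idx))
--
--     return block_list
-- ===== SOURCE B (Python) =====
-- def find_D_blocks(least_idx: int, diff_str: str):
--     block_list = []
--     i = 0
--     n = len(diff_str)
--     while i < n:
--         if diff_str[i] == 'D':
--             j = i + 1
--             while j < n and diff_str[j] == 'D':
--                 j += 1
--             block_list.append((i, j - 1))
--             i = j
--         else:
--             i += 1
--     return block_list
-- ===== Notes on version B (the rewrite author's own statement) =====
-- stated objective: alternative
-- what changed: Replaces the per-character boolean state machine (is_block/start_idx/end_idx flags with a final flush) by a run-at-a-time scanner: on meeting a 'D' it consumes the whole maximal run with an inner scan and emits the block immediately, so no cross-iteration flags and no post-loop flush exist.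
import Mathlib
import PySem

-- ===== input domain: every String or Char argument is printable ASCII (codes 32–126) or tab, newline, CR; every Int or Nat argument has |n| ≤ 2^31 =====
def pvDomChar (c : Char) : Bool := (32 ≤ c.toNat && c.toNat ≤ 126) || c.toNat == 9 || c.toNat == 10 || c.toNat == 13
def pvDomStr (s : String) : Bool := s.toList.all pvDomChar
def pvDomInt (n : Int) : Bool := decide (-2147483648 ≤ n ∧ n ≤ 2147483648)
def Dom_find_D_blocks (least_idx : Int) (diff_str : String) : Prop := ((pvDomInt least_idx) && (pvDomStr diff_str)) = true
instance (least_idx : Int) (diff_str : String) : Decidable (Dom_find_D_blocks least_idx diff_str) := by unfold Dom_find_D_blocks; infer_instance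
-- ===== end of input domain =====

-- B replaces A's per-character boolean state machine by a run-at-a-time scanner
-- that consumes each maximal 'D' run and emits its block immediately (alternative
-- decomposition, same cost); `least_idx` is unused, exactly as in A.

-- ===== PORT A =====
-- loop state: (block_list, is_block, start_idx, end_idx); at each append
-- start_idx/end_idx are always `some`, so `.getD 0` never yields its default.
def stepA (st : List (Int × Int) × Bool × Option Int × Option Int) (p : Int × Char) :
    List (Int × Int) × Bool × Option Int × Option Int :=
  if st.2.1 = false then
    if p.2 = 'D' then (st.1, true, some p.1, some p.1) else st
  else
    if p.2 = 'D' then (st.1, st.2.1, st.2.2.1, some p.1)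
    else (st.1 ++ [(st.2.2.1.getD 0, st.2.2.2.getD 0)], false, none, none)

-- the post-loop `if is_block: append((start_idx, end_idx))`
def finA (st : List (Int × Int) × Bool × Option Int × Option Int) : List (Int × Int) :=
  if st.2.1 = true then st.1 ++ [(st.2.2.1.getD 0, st.2.2.2.getD 0)] else st.1

def find_D_blocks (least_idx : Int) (diff_str : String) : List (Int × Int) :=
  finA ((PySem.List.enumerate diff_str.toList 0).foldl stepA ([], false, none, none))

-- ===== PORT B =====
-- outer while loop of Source B; the inner `while j < n and diff_str[j] == 'D'` run
-- scan is rendered as the length of the run `takeWhile (= 'D')` it measures.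
def altRun : List Char → Int → List (Int × Int)
  | [], _ => []
  | c :: t, i =>
    if c = 'D' then
      let k := (t.takeWhile (fun x => x = 'D')).length
      (i, i + k) :: altRun (t.drop k) (i + k + 1)
    else altRun t (i + 1)
termination_by cs _ => cs.length
decreasing_by
  all_goals simp only [List.length_drop, List.length_cons]; omega

def find_D_blocks_alt (least_idx : Int) (diff_str : String) : List (Int × Int) :=
  altRun diff_str.toList 0

-- ===== PRECONDITION & SPEC =====
def Spec_find_D_blocks (least_idx : Int) (diff_str : String) (out : List (Int × Int)) : Prop := out = find_D_blocks_alt least_idx diff_str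
instance (least_idx : Int) (diff_str : String) (out : List (Int × Int)) : Decidable (Spec_find_D_blocks least_idx diff_str out) := by unfold Spec_find_D_blocks; infer_instance

-- ===== CLAIM (what is proved, stated in full; the proofs are below) =====
def Claim_equal_find_D_blocks : Prop := ∀ (least_idx : Int) (diff_str : String), Dom_find_D_blocks least_idx diff_str → Spec_find_D_blocks least_idx diff_str (find_D_blocks least_idx diff_str)

-- ===== LEMMAS AND PROOFS =====

-- one induction covering both loop states of A: out of a block it produces
-- altRun, inside a block it finishes the current run first.
theorem key (t : List Char) (i : Int) (bl : List (Int × Int)) (s e : Int) :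
    finA ((PySem.List.enumerate t i).foldl stepA (bl, false, none, none)) = bl ++ altRun t i
    ∧ finA ((PySem.List.enumerate t i).foldl stepA (bl, true, some s, some e)) =
        bl ++ ((s, if (t.takeWhile (fun x => x = 'D')).length = 0 then e
                   else i + (t.takeWhile (fun x => x = 'D')).length - 1)
               :: altRun (t.drop ((t.takeWhile (fun x => x = 'D')).length))
                         (i + (t.takeWhile (fun x => x = 'D')).length)) := by
  induction t generalizing i bl s e with
  | nil => simp [PySem.List.enumerate, finA, altRun]
  | cons c t ih =>
    constructor
    · rw [PySem.List.enumerate_cons, List.foldl_cons]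
      by_cases hc : c = 'D'
      · simp only [stepA, hc, eq_self_iff_true, if_true, Bool.true_eq_false,
          Bool.false_eq_true, if_false]
        rw [(ih (i + 1) bl i i).2, altRun]
        simp only [hc, eq_self_iff_true, if_true, List.takeWhile_cons, decide_true]
        split_ifs <;>
          first
            | (exfalso; assumption)
            | (congr 2 <;> first | rfl | omega | (congr 1 <;> omega))
      · simp only [stepA, hc, eq_self_iff_true, if_true, Bool.true_eq_false,
          Bool.false_eq_true, if_false]
        rw [(ih (i + 1) bl s e).1, altRun]
        simp [hc]
    · rw [PySem.List.enumerate_cons, List.foldl_cons]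
      by_cases hc : c = 'D'
      · simp only [stepA, hc, eq_self_iff_true, if_true, Bool.true_eq_false,
          Bool.false_eq_true, if_false]
        rw [(ih (i + 1) bl s i).2]
        simp only [List.takeWhile_cons, hc, decide_true, eq_self_iff_true, if_true,
          List.length_cons, List.drop_succ_cons]
        split_ifs <;>
          first
            | (exfalso; assumption)
            | (congr 2 <;> first | rfl | omega | (congr 1 <;> omega))
      · simp only [stepA, hc, eq_self_iff_true, if_true, Bool.true_eq_false,
          Bool.false_eq_true, if_false, Option.getD_some]
        rw [(ih (i + 1) (bl ++ [(s, e)]) s e).1]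
        simp only [List.takeWhile_cons, hc, decide_false, Bool.false_eq_true, if_false,
          List.length_nil, List.drop_zero, Nat.cast_zero, add_zero]
        rw [altRun]
        simp [hc]

-- ===== VERDICT (by name: the statement is the Claim_ definition above) =====
theorem find_D_blocks_spec : Claim_equal_find_D_blocks := by
  intro least_idx diff_str _
  unfold Spec_find_D_blocks find_D_blocks find_D_blocks_alt
  simpa using (key diff_str.toList 0 [] 0 0).1
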